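-- pv_equiv track=rewrite | github.com/NobuyukiInoue/LeetCode | Problems/1600_1699/1624_Largest_Substring_Between_Two_Equal_Characters/Project_Python3/Largest_Substring_Between_Two_Equal_Characters.py | maxLengthBetweenEqualCharacters2
-- ===== SOURCE A (Python) =====
-- def maxLengthBetweenEqualCharacters2(s: str) -> int:
--     # 28ms
--     d = [-1] * 26
--     ans = -1
--     for i, c in enumerate(s):
--         o = ord(c) - ord('a')
--         if d[o] != -1:
--             ans = max(ans, i - d[o] - 1)
--         if d[o] == -1:
--             d[o] = i
--     return ans
-- ===== SOURCE B (Python) =====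
-- def maxLengthBetweenEqualCharacters2(s: str) -> int:
--     ans = -1
--     for c in set(s):
--         ans = max(ans, s.rfind(c) - s.index(c) - 1)
--     return ans
-- ===== Notes on version B (the rewrite author's own statement) =====
-- stated objective: faster
-- what changed: Replaced A's Python-level index-tracking pass over a 26-slot array with a max over the distinct characters of s of s.rfind(c) - s.index(c) - 1 (starting from -1), whose per-character scans run in C built-ins.
-- outside the precondition, e.g. on maxLengthBetweenEqualCharacters2('Ga'): A returns 0, B returns -1
import Mathlib
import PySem

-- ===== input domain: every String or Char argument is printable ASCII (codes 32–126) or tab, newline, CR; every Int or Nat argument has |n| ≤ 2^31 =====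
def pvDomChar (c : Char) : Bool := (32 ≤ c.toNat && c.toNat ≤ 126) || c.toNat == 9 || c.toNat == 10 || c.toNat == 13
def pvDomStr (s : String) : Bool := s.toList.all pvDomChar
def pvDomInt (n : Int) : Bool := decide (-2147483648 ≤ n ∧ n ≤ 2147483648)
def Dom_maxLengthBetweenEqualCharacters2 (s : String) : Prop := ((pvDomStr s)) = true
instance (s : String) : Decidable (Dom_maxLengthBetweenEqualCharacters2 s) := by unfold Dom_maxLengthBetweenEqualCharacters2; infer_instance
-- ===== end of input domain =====

-- B replaces A's index-tracking pass over a 26-slot array by a max of rfind-index gaps over the distinct characters (idiomatic decomposition; same results on lowercase strings).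


-- ===== PORT A =====
-- the loop 'for i, c in enumerate(s)' with state (d, ans); d[o] read/written via the
-- Python-index primitives (negative indices wrap; none = IndexError, a case outside Pre_,
-- where this total port returns -2).
def pvGoA : List (Int × Char) → List Int → Int → Int
  | [], _, ans => ans
  | (i, c) :: rest, d, ans =>
    let o : Int := (c.toNat : Int) - 97
    match PySem.List.pyGet? d o with
    | none => -2
    | some v =>
      let ans' := if v ≠ -1 then max ans (i - v - 1) else ans
      let d' := if v = -1 then PySem.List.pySetD d o i else d
      pvGoA rest d' ans'

def maxLengthBetweenEqualCharacters2 (s : String) : Int :=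
  pvGoA (PySem.List.enumerate s.toList) (List.replicate 26 (-1)) (-1)

-- ===== PORT B =====
-- 'for c in set(s): ans = max(ans, s.rfind(c) - s.index(c) - 1)' — a running max is
-- independent of the set's iteration order, so iterating PySem.Set.ofList is exact.
def maxLengthBetweenEqualCharacters2_alt (s : String) : Int :=
  (PySem.Set.ofList s.toList).foldl
    (fun ans c => max ans (PySem.Chars.rfind s.toList [c] - PySem.Chars.find s.toList [c] - 1)) (-1)

-- ===== PRECONDITION & SPEC =====
-- the 26-array slot A's (possibly negative, wrapping) index ord(c)-97 denotes
def pvSlot (c : Char) : Nat := ((((c.toNat : Int) - 97)) % 26).toNat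

-- Pre_ excludes strings with a character of code outside [71,122], on which A raises
-- IndexError, and strings in which two DISTINCT characters share the same slot modulo 26,
-- where A's value comes from Python's negative-index wraparound conflating them (e.g. 'G','a').
def Pre_maxLengthBetweenEqualCharacters2 (s : String) : Prop :=
  ((s.toList.all (fun c => 71 ≤ c.toNat && c.toNat ≤ 122)) &&
   (s.toList.all (fun c => s.toList.all (fun c' => !(pvSlot c == pvSlot c') || c == c')))) = true
instance (s : String) : Decidable (Pre_maxLengthBetweenEqualCharacters2 s) := by unfold Pre_maxLengthBetweenEqualCharacters2; infer_instance
def pvWitness_maxLengthBetweenEqualCharacters2 : String := "abcabc"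

def Spec_maxLengthBetweenEqualCharacters2 (s : String) (out : Int) : Prop := out = maxLengthBetweenEqualCharacters2_alt s
instance (s : String) (out : Int) : Decidable (Spec_maxLengthBetweenEqualCharacters2 s out) := by unfold Spec_maxLengthBetweenEqualCharacters2; infer_instance

-- ===== CLAIM (what is proved, stated in full; the proofs are below) =====
def Claim_equal_maxLengthBetweenEqualCharacters2 : Prop := ∀ (s : String), Dom_maxLengthBetweenEqualCharacters2 s → Pre_maxLengthBetweenEqualCharacters2 s → Spec_maxLengthBetweenEqualCharacters2 s (maxLengthBetweenEqualCharacters2 s)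

-- ===== LEMMAS AND PROOFS =====

-- B's per-string value, as a function of the character list (defeq to the alt port's body).
def pvF (l : List Char) : Int :=
  (PySem.Set.ofList l).foldl
    (fun ans c => max ans (PySem.Chars.rfind l [c] - PySem.Chars.find l [c] - 1)) (-1)

lemma pv_isPrefixOf_nil (c : Char) : [c].isPrefixOf ([] : List Char) = false := rfl

lemma pv_isPrefixOf_cons (c x : Char) (t : List Char) :
    [c].isPrefixOf (x :: t) = (c == x) := by
  simp [List.isPrefixOf]

lemma pv_isPrefixOf_snoc {c x : Char} (h : c ≠ x) (m : List Char) :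
    [c].isPrefixOf (m ++ [x]) = [c].isPrefixOf m := by
  cases m with
  | nil => simp [pv_isPrefixOf_cons, pv_isPrefixOf_nil, h]
  | cons y t => simp [pv_isPrefixOf_cons]

lemma pv_findgo_nil (c : Char) (k : Nat) : PySem.Chars.find.go [c] [] k = -1 := rfl

lemma pv_findgo_cons (c x : Char) (t : List Char) (k : Nat) :
    PySem.Chars.find.go [c] (x :: t) k
      = if c = x then (k : Int) else PySem.Chars.find.go [c] t (k + 1) := by
  rw [PySem.Chars.find.go]
  by_cases h : c = x <;> simp [pv_isPrefixOf_cons, h]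

lemma pv_findgo_snoc (c x : Char) : ∀ (l : List Char) (k : Nat),
    PySem.Chars.find.go [c] (l ++ [x]) k
      = if c ∈ l then PySem.Chars.find.go [c] l k
        else (if c = x then ((k : Int) + l.length) else -1) := by
  intro l
  induction l with
  | nil => intro k; simp [pv_findgo_cons, pv_findgo_nil]
  | cons y t ih =>
    intro k
    by_cases hy : c = y
    · simp [hy, pv_findgo_cons]
    · simp only [List.cons_append, pv_findgo_cons, hy, if_false, ih, List.mem_cons]
      by_cases ht : c ∈ t
      · simp [ht, hy]
      · simp [ht, hy]
        split <;> [push_cast; skip] <;> ring_nf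

lemma pv_find_nil (c : Char) : PySem.Chars.find [] [c] = -1 := rfl

lemma pv_find_snoc (c x : Char) (l : List Char) :
    PySem.Chars.find (l ++ [x]) [c]
      = if c ∈ l then PySem.Chars.find l [c]
        else (if c = x then (l.length : Int) else -1) := by
  unfold PySem.Chars.find
  rw [pv_findgo_snoc]
  simp

lemma pv_find_neg_iff (c : Char) (l : List Char) :
    PySem.Chars.find l [c] = -1 ↔ c ∉ l := by
  rw [PySem.Chars.find_eq_neg_one_iff]
  constructor
  · intro h hc
    obtain ⟨pre, suf, rfl⟩ := List.append_of_mem hc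
    exact h ⟨pre, suf, by simp⟩
  · rintro h ⟨pre, suf, rfl⟩
    exact h (by simp)

lemma pv_rfindgo_zero (s sub : List Char) :
    PySem.Chars.rfind.go s sub 0 = if sub.isPrefixOf s then 0 else -1 := by
  rw [PySem.Chars.rfind.go]

lemma pv_rfindgo_succ (s sub : List Char) (j : Nat) :
    PySem.Chars.rfind.go s sub (j + 1)
      = if sub.isPrefixOf (s.drop (j + 1)) then ((j : Int) + 1) else PySem.Chars.rfind.go s sub j := by
  rw [PySem.Chars.rfind.go]
  push_cast
  rfl

lemma pv_rfindgo_le (l sub : List Char) : ∀ (k : Nat), PySem.Chars.rfind.go l sub k ≤ (k : Int) := by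
  intro k
  induction k with
  | zero => rw [pv_rfindgo_zero]; split <;> simp
  | succ j ih =>
    rw [pv_rfindgo_succ]
    split
    · simp
    · exact le_trans ih (by push_cast; omega)

lemma pv_rfind_le (l : List Char) (c : Char) :
    PySem.Chars.rfind l [c] ≤ (l.length : Int) := pv_rfindgo_le _ _ _

lemma pv_rfindgo_snoc {c x : Char} (h : c ≠ x) (l : List Char) :
    ∀ (k : Nat), k ≤ l.length →
      PySem.Chars.rfind.go (l ++ [x]) [c] k = PySem.Chars.rfind.go l [c] k := by
  intro k
  induction k with
  | zero =>
    intro _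
    rw [pv_rfindgo_zero, pv_rfindgo_zero, pv_isPrefixOf_snoc h]
  | succ j ih =>
    intro hk
    rw [pv_rfindgo_succ, pv_rfindgo_succ]
    rw [List.drop_append_of_le_length (by omega), pv_isPrefixOf_snoc h]
    rw [ih (by omega)]

lemma pv_rfind_snoc_self (c : Char) (l : List Char) :
    PySem.Chars.rfind (l ++ [c]) [c] = (l.length : Int) := by
  unfold PySem.Chars.rfind
  have hlen : (l ++ [c]).length = l.length + 1 := by simp
  rw [hlen, pv_rfindgo_succ]
  have h1 : List.drop (l.length + 1) (l ++ [c]) = [] := by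
    apply List.drop_eq_nil_of_le; simp
  rw [h1]
  simp only [pv_isPrefixOf_nil, if_false]
  cases l with
  | nil =>
    simp only [List.nil_append, List.length_nil, Bool.false_eq_true, if_false]
    rw [pv_rfindgo_zero]
    simp [pv_isPrefixOf_cons]
  | cons y t =>
    rw [show (y :: t).length = t.length + 1 from rfl, pv_rfindgo_succ,
        show t.length + 1 = (y :: t).length from rfl]
    have h2 : List.drop ((y :: t).length) ((y :: t) ++ [c]) = [c] := by
      simp [List.drop_append_of_le_length]
    rw [h2, pv_isPrefixOf_cons]
    simp

lemma pv_rfind_snoc_ne {c x : Char} (h : c ≠ x) (l : List Char) :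
    PySem.Chars.rfind (l ++ [x]) [c] = PySem.Chars.rfind l [c] := by
  unfold PySem.Chars.rfind
  have hlen : (l ++ [x]).length = l.length + 1 := by simp
  rw [hlen, pv_rfindgo_succ]
  have h1 : List.drop (l.length + 1) (l ++ [x]) = [] := by
    apply List.drop_eq_nil_of_le; simp
  rw [h1]
  simp only [pv_isPrefixOf_nil, if_false]
  exact pv_rfindgo_snoc h l l.length le_rfl

lemma pv_foldl_max_init (g : Char → Int) (L : List Char) (a b : Int) :
    L.foldl (fun acc y => max acc (g y)) (max a b) = max a (L.foldl (fun acc y => max acc (g y)) b) := by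
  induction L generalizing b with
  | nil => rfl
  | cons x t ih =>
    simp only [List.foldl_cons]
    rw [max_assoc, ih]

lemma pv_foldl_max_congr (f g : Char → Int) : ∀ (L : List Char) (a : Int),
    (∀ x ∈ L, f x = g x) →
    L.foldl (fun acc y => max acc (f y)) a = L.foldl (fun acc y => max acc (g y)) a := by
  intro L
  induction L with
  | nil => intro a _; rfl
  | cons x t ih =>
    intro a h
    simp only [List.foldl_cons]
    rw [h x (by simp), ih _ (fun y hy => h y (by simp [hy]))]

lemma pv_init_le_foldl_max (g : Char → Int) : ∀ (L : List Char) (a : Int),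
    a ≤ L.foldl (fun acc y => max acc (g y)) a := by
  intro L
  induction L with
  | nil => intro a; simp
  | cons x t ih =>
    intro a
    simp only [List.foldl_cons]
    exact le_trans (le_max_left a (g x)) (ih _)

lemma pv_fold_max_update (S : List Char) (f g : Char → Int) (c : Char)
    (hc : c ∈ S) (hnd : S.Nodup)
    (hfg : ∀ x ∈ S, x ≠ c → g x = f x) (hle : f c ≤ g c) :
    S.foldl (fun a x => max a (g x)) (-1)
      = max (S.foldl (fun a x => max a (f x)) (-1)) (g c) := by
  obtain ⟨S1, S2, rfl⟩ := List.append_of_mem hc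
  have hdis : List.Disjoint S1 (c :: S2) := List.disjoint_of_nodup_append hnd
  have hc1 : c ∉ S1 := fun hmem => hdis hmem (by simp)
  have hc2 : c ∉ S2 := by
    have h2 := List.Nodup.of_append_right (l₁ := S1) hnd
    exact (List.nodup_cons.mp h2).1
  simp only [List.foldl_append, List.foldl_cons]
  rw [pv_foldl_max_congr g f S1 _ (fun x hx => hfg x (by simp [hx]) (fun he => hc1 (he ▸ hx)))]
  rw [pv_foldl_max_congr g f S2 _ (fun x hx => hfg x (by simp [hx]) (fun he => hc2 (he ▸ hx)))]
  set A := S1.foldl (fun a x => max a (f x)) (-1) with hA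
  have e1 : max A (g c) = max (g c) A := max_comm _ _
  have e2 : max A (f c) = max (f c) A := max_comm _ _
  rw [e1, e2, pv_foldl_max_init, pv_foldl_max_init]
  omega

lemma pv_set_ofList_snoc_mem {c : Char} {l : List Char} (hc : c ∈ l) :
    PySem.Set.ofList (l ++ [c]) = PySem.Set.ofList l := by
  rw [PySem.Set.ofList_eq_foldl, PySem.Set.ofList_eq_foldl, List.foldl_append]
  simp only [List.foldl_cons, List.foldl_nil]
  rw [← PySem.Set.ofList_eq_foldl]
  simp [PySem.Set.add, PySem.Set.contains, hc]

lemma pv_set_ofList_snoc_not_mem {c : Char} {l : List Char} (hc : c ∉ l) :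
    PySem.Set.ofList (l ++ [c]) = PySem.Set.ofList l ++ [c] := by
  rw [PySem.Set.ofList_eq_foldl, PySem.Set.ofList_eq_foldl, List.foldl_append]
  simp only [List.foldl_cons, List.foldl_nil]
  rw [← PySem.Set.ofList_eq_foldl]
  simp [PySem.Set.add, PySem.Set.contains, hc]

lemma pv_mem_ofList {c : Char} {l : List Char} : c ∈ PySem.Set.ofList l ↔ c ∈ l :=
  PySem.Set.mem_ofList l c

lemma pvF_snoc_mem {c : Char} {l : List Char} (hc : c ∈ l) :
    pvF (l ++ [c]) = max (pvF l) ((l.length : Int) - PySem.Chars.find l [c] - 1) := by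
  unfold pvF
  rw [pv_set_ofList_snoc_mem hc]
  have hgap : PySem.Chars.rfind (l ++ [c]) [c] - PySem.Chars.find (l ++ [c]) [c] - 1
      = (l.length : Int) - PySem.Chars.find l [c] - 1 := by
    rw [pv_rfind_snoc_self, pv_find_snoc]
    simp [hc]
  rw [pv_fold_max_update (PySem.Set.ofList l)
      (fun x => PySem.Chars.rfind l [x] - PySem.Chars.find l [x] - 1)
      (fun x => PySem.Chars.rfind (l ++ [c]) [x] - PySem.Chars.find (l ++ [c]) [x] - 1)
      c (pv_mem_ofList.mpr hc) (PySem.Set.nodup_ofList l)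
      (fun x hx hne => by
        simp only [pv_rfind_snoc_ne hne, pv_find_snoc, pv_mem_ofList.mp hx, if_true])
      (by
        simp only [hgap]
        have := pv_rfind_le l c
        omega)]
  simp only [hgap]

lemma pvF_snoc_not_mem {c : Char} {l : List Char} (hc : c ∉ l) :
    pvF (l ++ [c]) = pvF l := by
  unfold pvF
  rw [pv_set_ofList_snoc_not_mem hc, List.foldl_append]
  simp only [List.foldl_cons, List.foldl_nil]
  rw [pv_foldl_max_congr _ (fun x => PySem.Chars.rfind l [x] - PySem.Chars.find l [x] - 1)
      _ _ (fun x hx => by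
        have hxl : x ∈ l := pv_mem_ofList.mp hx
        have hne : x ≠ c := fun he => hc (he ▸ hxl)
        simp only [pv_rfind_snoc_ne hne, pv_find_snoc, hxl, if_true])]
  have hself : PySem.Chars.rfind (l ++ [c]) [c] - PySem.Chars.find (l ++ [c]) [c] - 1 = -1 := by
    rw [pv_rfind_snoc_self, pv_find_snoc]
    simp [hc]
  rw [hself]
  have hle := pv_init_le_foldl_max
    (fun x => PySem.Chars.rfind l [x] - PySem.Chars.find l [x] - 1) (PySem.Set.ofList l) (-1)
  omega

lemma pv_pyIdx (o : Int) (h1 : -26 ≤ o) (h2 : o < 26) :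
    PySem.List.pyIdx? 26 o = some ((o % 26).toNat) := by
  unfold PySem.List.pyIdx?
  by_cases ha : 0 ≤ o
  · rw [if_pos ha, if_pos (by push_cast; omega)]
    congr 1; omega
  · rw [if_neg ha, if_pos (by push_cast; omega)]
    congr 1; omega

lemma pv_pyGet_mod {d : List Int} (o : Int) (hlen : d.length = 26)
    (h1 : -26 ≤ o) (h2 : o < 26) :
    PySem.List.pyGet? d o = d[(o % 26).toNat]? := by
  simp only [PySem.List.pyGet?, hlen, pv_pyIdx o h1 h2, Option.bind_some]

lemma pv_pySetD_mod {d : List Int} (o : Int) (v : Int) (hlen : d.length = 26)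
    (h1 : -26 ≤ o) (h2 : o < 26) :
    PySem.List.pySetD d o v = d.set ((o % 26).toNat) v := by
  simp only [PySem.List.pySetD, PySem.List.pySet?, hlen, pv_pyIdx o h1 h2, Option.map_some,
    Option.getD_some]

lemma pv_main : ∀ (l2 l1 : List Char) (d : List Int) (ans : Int) (L : List Char),
    (∀ c ∈ L, 71 ≤ c.toNat ∧ c.toNat ≤ 122) →
    (∀ c ∈ L, ∀ c' ∈ L, pvSlot c = pvSlot c' → c = c') →
    (∀ c ∈ l2, c ∈ L) →
    d.length = 26 →
    (∀ c ∈ L, d[pvSlot c]? = some (PySem.Chars.find l1 [c])) →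
    ans = pvF l1 →
    pvGoA (PySem.List.enumerate l2 (l1.length : Int)) d ans = pvF (l1 ++ l2) := by
  intro l2
  induction l2 with
  | nil =>
    intro l1 d ans L _ _ _ _ _ hans
    simp [PySem.List.enumerate_nil, pvGoA, hans]
  | cons c t ih =>
    intro l1 d ans L hrange hinj hsub hlen hd hans
    have hcL : c ∈ L := hsub c (by simp)
    have hc : 71 ≤ c.toNat ∧ c.toNat ≤ 122 := hrange c hcL
    rw [PySem.List.enumerate_cons]
    simp only [pvGoA]
    have hbounds : -26 ≤ (c.toNat : Int) - 97 ∧ (c.toNat : Int) - 97 < 26 := by omega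
    have hslot : ((((c.toNat : Int) - 97)) % 26).toNat = pvSlot c := rfl
    have hget : PySem.List.pyGet? d ((c.toNat : Int) - 97)
        = some (PySem.Chars.find l1 [c]) := by
      rw [pv_pyGet_mod _ hlen hbounds.1 hbounds.2, hslot, hd c hcL]
    simp only [hget]
    have hslot_lt : pvSlot c < 26 := by
      unfold pvSlot; omega
    by_cases hmem : c ∈ l1
    · have hne : PySem.Chars.find l1 [c] ≠ -1 := by
        intro h; exact (pv_find_neg_iff c l1).mp h hmem
      rw [if_pos hne, if_neg hne]
      have hstep : ((l1.length : Int) + 1) = (((l1 ++ [c]).length : Int)) := by simp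
      rw [hstep, ih (l1 ++ [c]) d _ L hrange hinj (fun x hx => hsub x (by simp [hx])) hlen
        (fun c' hc' => by
          rw [hd c' hc', pv_find_snoc]
          by_cases hm : c' ∈ l1
          · simp [hm]
          · have : c' ≠ c := fun he => hm (he ▸ hmem)
            simp [hm, this, (pv_find_neg_iff c' l1).mpr hm])
        (by rw [pvF_snoc_mem hmem, hans])]
      simp
    · have heq : PySem.Chars.find l1 [c] = -1 := (pv_find_neg_iff c l1).mpr hmem
      simp only [heq, if_true]
      have hstep : ((l1.length : Int) + 1) = (((l1 ++ [c]).length : Int)) := by simp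
      rw [hstep, ih (l1 ++ [c]) _ _ L hrange hinj (fun x hx => hsub x (by simp [hx]))
        (by rw [pv_pySetD_mod _ _ hlen hbounds.1 hbounds.2]; simp [hlen])
        (fun c' hc' => by
          rw [pv_pySetD_mod _ _ hlen hbounds.1 hbounds.2, hslot, pv_find_snoc]
          by_cases hcc : c' = c
          · subst hcc
            rw [List.getElem?_set_self (by omega)]
            simp [hmem]
          · have hsne : pvSlot c ≠ pvSlot c' := fun h =>
              hcc (hinj c' hc' c hcL (h.symm) |>.symm ▸ rfl)
            rw [List.getElem?_set_ne hsne]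
            by_cases hm : c' ∈ l1
            · simp [hm, hd c' hc']
            · simp [hm, hcc, hd c' hc', (pv_find_neg_iff c' l1).mpr hm])
        (by rw [pvF_snoc_not_mem hmem, hans]; simp)]
      simp

-- ===== VERDICT (by name: the statement is the Claim_ definition above) =====
theorem maxLengthBetweenEqualCharacters2_spec : Claim_equal_maxLengthBetweenEqualCharacters2 := by
  unfold Claim_equal_maxLengthBetweenEqualCharacters2
  intro s _ hpre
  unfold Spec_maxLengthBetweenEqualCharacters2 maxLengthBetweenEqualCharacters2 maxLengthBetweenEqualCharacters2_alt
  unfold Pre_maxLengthBetweenEqualCharacters2 at hpre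
  rw [Bool.and_eq_true] at hpre
  have hrange : ∀ c ∈ s.toList, 71 ≤ c.toNat ∧ c.toNat ≤ 122 := by
    intro c hcmem
    have := List.all_eq_true.mp hpre.1 c hcmem
    simpa using this
  have hinj : ∀ c ∈ s.toList, ∀ c' ∈ s.toList, pvSlot c = pvSlot c' → c = c' := by
    intro c hcmem c' hcmem' hsl
    have h1 := List.all_eq_true.mp (List.all_eq_true.mp hpre.2 c hcmem) c' hcmem'
    simp only [Bool.or_eq_true, Bool.not_eq_eq_eq_not, Bool.not_true, beq_eq_false_iff_ne,
      ne_eq, beq_iff_eq] at h1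
    rcases h1 with h | h
    · exact absurd hsl h
    · exact h
  have h := pv_main s.toList [] (List.replicate 26 (-1)) (-1) s.toList hrange hinj
    (fun c hc => hc) (by simp)
    (fun c hc => by
      rw [List.getElem?_replicate]
      have : pvSlot c < 26 := by unfold pvSlot; omega
      simp [pv_find_nil, this])
    (by rfl)
  simpa [pvF] using h
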